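-- pv_equiv track=rewrite | github.com/santiago120600/ADN_Mutante | init.py | checar_horizontal
-- ===== SOURCE A (Python) =====
-- def checar_horizontal(matriz):
--     # contador para contar el numero de apariciones de string
--     contador = 0
--     for fila in matriz:
--         # convertir lista a string
--         fila_string = convertir_a_string(fila)
--         # checar si se encuentra el patron AAAA TTTT CCCC GGGG
--         if fila_string.find("TTTT") != -1 or fila_string.find("AAAA") != -1 or fila_string.find("CCCC") != -1 or fila_string.find("GGGG") != -1:
--             contador +=1
--         else:
--             continue
--     return contador
--
-- def convertir_a_string(lista):
--     string = ""
--     for i in lista: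
--         string += i
--     return string
-- ===== SOURCE B (Python) =====
-- def checar_horizontal(matriz):
--     contador = 0
--     for fila in matriz:
--         fila_string = "".join(fila)
--         run = 0
--         prev = None
--         for ch in fila_string:
--             run = run + 1 if ch == prev else 1
--             prev = ch
--             if run == 4 and ch in "ATCG":
--                 contador += 1
--                 break
--     return contador
-- ===== Notes on version B (the rewrite author's own statement) =====
-- stated objective: alternative
-- what changed: Replaces the four independent substring searches (find of TTTT/AAAA/CCCC/GGGG on the joined row) with a single left-to-right run-length scan over the joined row's characters that stops at the first run of 4 identical base characters.
import Mathlib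
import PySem

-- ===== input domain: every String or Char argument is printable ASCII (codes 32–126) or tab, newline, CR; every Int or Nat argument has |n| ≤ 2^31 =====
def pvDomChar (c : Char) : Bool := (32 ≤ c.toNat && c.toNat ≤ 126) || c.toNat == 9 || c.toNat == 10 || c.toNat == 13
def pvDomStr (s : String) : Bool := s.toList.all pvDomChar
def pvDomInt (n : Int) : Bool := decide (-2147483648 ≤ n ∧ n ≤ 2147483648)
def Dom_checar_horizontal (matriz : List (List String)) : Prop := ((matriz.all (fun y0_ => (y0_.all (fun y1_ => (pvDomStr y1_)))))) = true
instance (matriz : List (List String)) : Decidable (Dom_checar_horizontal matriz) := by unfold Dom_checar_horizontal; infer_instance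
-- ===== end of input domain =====

-- B replaces four substring searches with a single run-length scan over the joined row (alternative decomposition).


-- ===== PORT A =====
-- convertir_a_string: fold '+=' over the row (String.append is exact on code points)
def convertir_a_string (lista : List String) : String :=
  lista.foldl (fun s i => s ++ i) ""

def checar_horizontal (matriz : List (List String)) : Int :=
  matriz.foldl (fun contador fila =>
    let fila_string := convertir_a_string fila
    if PySem.Str.find fila_string "TTTT" ≠ -1 ∨ PySem.Str.find fila_string "AAAA" ≠ -1 ∨
       PySem.Str.find fila_string "CCCC" ≠ -1 ∨ PySem.Str.find fila_string "GGGG" ≠ -1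
    then contador + 1 else contador) 0

-- ===== PORT B =====
-- ch in "ATCG" (character membership in that literal)
def altIsBase (c : Char) : Bool := c == 'A' || c == 'T' || c == 'C' || c == 'G'

-- the inner for-loop of Source B: run-length counter, break (return true) on a run of 4 bases
def altScan (prev : Option Char) (run : Nat) : List Char → Bool
  | [] => false
  | c :: cs =>
    let run' := if some c == prev then run + 1 else 1
    if run' == 4 && altIsBase c then true else altScan (some c) run' cs

def checar_horizontal_alt (matriz : List (List String)) : Int :=
  matriz.foldl (fun contador fila =>
    if altScan none 0 (PySem.Str.join "" fila).toList then contador + 1 else contador) 0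

-- ===== PRECONDITION & SPEC =====
def Spec_checar_horizontal (matriz : List (List String)) (out : Int) : Prop := out = checar_horizontal_alt matriz
instance (matriz : List (List String)) (out : Int) : Decidable (Spec_checar_horizontal matriz out) := by unfold Spec_checar_horizontal; infer_instance

-- ===== CLAIM (what is proved, stated in full; the proofs are below) =====
def Claim_equal_checar_horizontal : Prop := ∀ (matriz : List (List String)), Dom_checar_horizontal matriz → Spec_checar_horizontal matriz (checar_horizontal matriz)

-- ===== LEMMAS AND PROOFS =====

lemma foldl_append_toList (l : List String) (s : String) :
    (l.foldl (fun a b => a ++ b) s).toList = s.toList ++ (l.map String.toList).flatten := by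
  induction l generalizing s with
  | nil => simp
  | cons x xs ih => simp [List.foldl_cons, ih]

lemma join_empty_sep (parts : List (List Char)) :
    PySem.Chars.join [] parts = parts.flatten := by
  induction parts with
  | nil => simp [PySem.Chars.join_nil]
  | cons p rest ih =>
    cases rest with
    | nil => simp [PySem.Chars.join_singleton]
    | cons q r => simp [PySem.Chars.join_cons_cons, ih]

-- the joined strings coincide
lemma toList_convertir (lista : List String) :
    (convertir_a_string lista).toList = (PySem.Str.join "" lista).toList := by
  simp [convertir_a_string, foldl_append_toList, PySem.Str.toList_join, join_empty_sep]

-- window recursion characterising "contains a 4-run of a base"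
def hasQuadB : List Char → Bool
  | a :: b :: c :: d :: rest =>
      (a == b && b == c && c == d && altIsBase a) || hasQuadB (b :: c :: d :: rest)
  | _ => false

lemma hasQuadB_cons (a : Char) (l : List Char) :
    hasQuadB (a :: l) = ((altIsBase a && (List.replicate 3 a).isPrefixOf l) || hasQuadB l) := by
  match l with
  | [] => simp [hasQuadB, List.replicate]
  | [b] => simp [hasQuadB, List.replicate, List.isPrefixOf]
  | [b, c] => simp [hasQuadB, List.replicate, List.isPrefixOf]
  | b :: c :: d :: rest =>
    show ((a == b && b == c && c == d && altIsBase a) || hasQuadB (b :: c :: d :: rest)) = _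
    by_cases hab : a = b
    · subst hab
      by_cases hbc : a = c
      · subst hbc
        by_cases hcd : a = d
        · subst hcd; simp [List.isPrefixOf, List.replicate, Bool.and_comm]
        · simp [List.isPrefixOf, List.replicate, Bool.and_comm]
      · simp [List.isPrefixOf, List.replicate, beq_eq_false_iff_ne.mpr hbc]
    · simp [List.isPrefixOf, List.replicate, beq_eq_false_iff_ne.mpr hab]

lemma hasQuadB_iff (cs : List Char) :
    hasQuadB cs = true ↔
      (['T','T','T','T'] <:+: cs ∨ ['A','A','A','A'] <:+: cs ∨
       ['C','C','C','C'] <:+: cs ∨ ['G','G','G','G'] <:+: cs) := by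
  induction cs with
  | nil =>
    simp only [hasQuadB]
    constructor
    · intro h; cases h
    · rintro (h | h | h | h) <;> (have := h.length_le; simp at this)
  | cons a l ih =>
    rw [hasQuadB_cons]
    simp only [List.infix_cons_iff (a := a), ih, Bool.or_eq_true, Bool.and_eq_true,
      List.isPrefixOf_iff_prefix, altIsBase, beq_iff_eq]
    have hpref : ∀ x : Char, ([x,x,x,x] <+: a :: l) ↔ (a = x ∧ [x,x,x] <+: l) := by
      intro x
      constructor
      · intro h
        rw [List.cons_prefix_cons] at h
        exact ⟨h.1.symm, h.2⟩
      · rintro ⟨h1, h2⟩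
        rw [List.cons_prefix_cons]
        exact ⟨h1.symm, h2⟩
    simp only [hpref]
    have hrep : ∀ x : Char, List.replicate 3 x = [x,x,x] := by intro x; rfl
    simp only [hrep]
    constructor
    · rintro (⟨(((hb | hb) | hb) | hb), hp⟩ | h)
      · exact Or.inr (Or.inl (Or.inl ⟨hb, hb ▸ hp⟩))
      · exact Or.inl (Or.inl ⟨hb, hb ▸ hp⟩)
      · exact Or.inr (Or.inr (Or.inl (Or.inl ⟨hb, hb ▸ hp⟩)))
      · exact Or.inr (Or.inr (Or.inr (Or.inl ⟨hb, hb ▸ hp⟩)))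
      · rcases h with h | h | h | h
        · exact Or.inl (Or.inr h)
        · exact Or.inr (Or.inl (Or.inr h))
        · exact Or.inr (Or.inr (Or.inl (Or.inr h)))
        · exact Or.inr (Or.inr (Or.inr (Or.inr h)))
    · rintro ((⟨ha, hp⟩ | h) | (⟨ha, hp⟩ | h) | (⟨ha, hp⟩ | h) | (⟨ha, hp⟩ | h))
      · subst ha; exact Or.inl ⟨by decide, hp⟩
      · exact Or.inr (Or.inl h)
      · subst ha; exact Or.inl ⟨by decide, hp⟩
      · exact Or.inr (Or.inr (Or.inl h))
      · subst ha; exact Or.inl ⟨by decide, hp⟩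
      · exact Or.inr (Or.inr (Or.inr (Or.inl h)))
      · subst ha; exact Or.inl ⟨by decide, hp⟩
      · exact Or.inr (Or.inr (Or.inr (Or.inr h)))

lemma hasQuadB_cons_nonbase {a : Char} (h : altIsBase a = false) (l : List Char) :
    hasQuadB (a :: l) = hasQuadB l := by
  rw [hasQuadB_cons, h]; simp

lemma altScan_gen (cs : List Char) : ∀ (p : Char) (r : Nat), 1 ≤ r → (4 ≤ r → altIsBase p = false) →
    altScan (some p) r cs =
      ((altIsBase p && decide (r ≤ 3) && (List.replicate (4 - r) p).isPrefixOf cs) || hasQuadB cs) := by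
  induction cs with
  | nil =>
    intro p r h1 h4
    by_cases hr : r ≤ 3
    · have : 4 - r = (3 - r) + 1 := by omega
      simp [altScan, hasQuadB, this, List.replicate_succ]
    · have : altIsBase p = false := h4 (by omega)
      simp [altScan, hasQuadB, this]
  | cons c cs ih =>
    intro p r h1 h4
    by_cases hc : c = p
    · subst hc
      show (if (if (some c == some c : Bool) then r + 1 else 1) == 4 && altIsBase c then true
            else altScan (some c) (if (some c == some c : Bool) then r + 1 else 1) cs) = _
      simp only [beq_self_eq_true, if_true]
      by_cases hb : altIsBase c
      · have hr3 : r ≤ 3 := by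
          by_contra h
          have := h4 (by omega); simp [this] at hb
        by_cases hr : r = 3
        · subst hr
          simp only [show ((3 + 1 : Nat) == 4) = true from rfl, hb, Bool.and_true, if_true]
          simp [List.replicate_succ, List.isPrefixOf]
        · have hne : ((r + 1 : Nat) == 4) = false := by
            simp; omega
          rw [hne]
          simp only [Bool.false_and, Bool.false_eq_true, if_false]
          rw [ih c (r + 1) (by omega) (by intro h; omega)]
          rw [hasQuadB_cons]
          have e1 : (4 - r) = (4 - (r + 1)) + 1 := by omega
          have e2 : (decide (r ≤ 3)) = true := by simp; omega
          have e3 : (decide (r + 1 ≤ 3)) = true := by simp; omega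
          rw [e1, e2, e3, List.replicate_succ]
          simp only [List.isPrefixOf, beq_self_eq_true, Bool.true_and, Bool.and_true]
          by_cases h3 : (List.replicate 3 c).isPrefixOf cs = true
          · have himp : (List.replicate (4 - (r + 1)) c).isPrefixOf cs = true := by
              rw [List.isPrefixOf_iff_prefix] at h3 ⊢
              calc List.replicate (4 - (r + 1)) c
                  <+: List.replicate 3 c := by
                    have h5 : List.replicate 3 c
                        = List.replicate (4 - (r+1)) c ++ List.replicate (3 - (4 - (r+1))) c := by
                      rw [← List.replicate_add]; congr 1; omega
                    exact h5 ▸ List.prefix_append _ _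
                _ <+: cs := h3
            have h3' : ([c,c,c].isPrefixOf cs) = true := h3
            have himp' : (List.replicate (3 - r) c).isPrefixOf cs = true := by
              have e : 4 - (r + 1) = 3 - r := by omega
              rw [e] at himp; exact himp
            simp [h3', himp']
          · simp only [Bool.not_eq_true] at h3
            rw [h3]
            cases hq : hasQuadB cs <;> simp [hb]
      · simp only [Bool.not_eq_true] at hb
        simp only [hb, Bool.and_false, Bool.false_eq_true, if_false]
        rw [ih c (r + 1) (by omega) (fun _ => hb)]
        rw [hasQuadB_cons_nonbase hb]
        simp only [hb, Bool.false_and, Bool.false_or]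
    · have hne : (some c == some p : Bool) = false := by simp [hc]
      show (if (if (some c == some p : Bool) then r + 1 else 1) == 4 && altIsBase c then true
            else altScan (some c) (if (some c == some p : Bool) then r + 1 else 1) cs) = _
      rw [hne]
      simp only [if_false, show ((1:Nat) == 4) = false from rfl, Bool.false_and,
        Bool.false_eq_true]
      rw [ih c 1 (by omega) (by omega)]
      rw [hasQuadB_cons]
      by_cases hr : r ≤ 3
      · have hpre : (List.replicate (4 - r) p).isPrefixOf (c :: cs) = false := by
          have h41 : 4 - r = (4 - r - 1) + 1 := by omega
          rw [h41, List.replicate_succ]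
          simp [List.isPrefixOf]
          intro h'; exact absurd h'.symm hc
        rw [hpre]
        simp
      · have hbp : altIsBase p = false := h4 (by omega)
        rw [hbp]
        simp

lemma altScan_eq_hasQuadB (cs : List Char) : altScan none 0 cs = hasQuadB cs := by
  cases cs with
  | nil => rfl
  | cons c l =>
    show (if (if (some c == (none : Option Char) : Bool) then 0 + 1 else 1) == 4 && altIsBase c then true
          else altScan (some c) (if (some c == (none : Option Char) : Bool) then 0 + 1 else 1) l) = _
    simp only [show (some c == (none : Option Char) : Bool) = false from rfl, if_false,
      show ((1:Nat) == 4) = false from rfl, Bool.false_and, Bool.false_eq_true]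
    rw [altScan_gen l c 1 (by omega) (by omega), hasQuadB_cons]
    simp

lemma row_iff (fila : List String) :
    (PySem.Str.find (convertir_a_string fila) "TTTT" ≠ -1 ∨ PySem.Str.find (convertir_a_string fila) "AAAA" ≠ -1 ∨
     PySem.Str.find (convertir_a_string fila) "CCCC" ≠ -1 ∨ PySem.Str.find (convertir_a_string fila) "GGGG" ≠ -1)
    ↔ altScan none 0 (PySem.Str.join "" fila).toList = true := by
  rw [altScan_eq_hasQuadB, hasQuadB_iff, ← toList_convertir]
  simp only [PySem.Str.find_eq, PySem.Chars.find_ne_neg_one_iff]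
  rfl

lemma fold_eq (matriz : List (List String)) :
    checar_horizontal matriz = checar_horizontal_alt matriz := by
  unfold checar_horizontal checar_horizontal_alt
  induction matriz using List.reverseRecOn with
  | nil => rfl
  | append_singleton rest fila ih =>
    rw [List.foldl_append, List.foldl_append, ih]
    simp only [List.foldl_cons, List.foldl_nil]
    exact if_congr (row_iff fila) rfl rfl

-- ===== VERDICT (by name: the statement is the Claim_ definition above) =====
theorem checar_horizontal_spec : Claim_equal_checar_horizontal := by
  intro matriz _
  exact fold_eq matriz
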